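-- pv_equiv track=rewrite | github.com/aphyer1992/dndsci-4e | hero_league.py | element_trump
-- ===== SOURCE A (Python) =====
-- def element_trump(elem_a, elem_b):
--     # return 1 to mean that A beats B, -1 to mean that B beats A
--     beat_pairs = [ ('W', 'F'), ('F', 'E'), ('E', 'W') ]
--     for pair in beat_pairs:
--         if elem_a == pair[0] and elem_b == pair[1]:
--             return(1)
--         if elem_a == pair[1] and elem_b == pair[0]:
--             return(-1)
--     return(0)
-- ===== SOURCE B (Python) =====
-- def element_trump(elem_a, elem_b):
--     # return 1 to mean that A beats B, -1 to mean that B beats A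
--     cycle = ('W', 'F', 'E')
--     if elem_a not in cycle or elem_b not in cycle:
--         return 0
--     diff = (cycle.index(elem_b) - cycle.index(elem_a)) % 3
--     return 1 if diff == 1 else (-1 if diff == 2 else 0)
-- ===== Notes on version B (the rewrite author's own statement) =====
-- stated objective: idiomatic
-- what changed: Replaces the scan over three explicit beat-pairs with modular index arithmetic over the cyclic ordering ('W','F','E'), where each element beats its successor mod 3.
import Mathlib
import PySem

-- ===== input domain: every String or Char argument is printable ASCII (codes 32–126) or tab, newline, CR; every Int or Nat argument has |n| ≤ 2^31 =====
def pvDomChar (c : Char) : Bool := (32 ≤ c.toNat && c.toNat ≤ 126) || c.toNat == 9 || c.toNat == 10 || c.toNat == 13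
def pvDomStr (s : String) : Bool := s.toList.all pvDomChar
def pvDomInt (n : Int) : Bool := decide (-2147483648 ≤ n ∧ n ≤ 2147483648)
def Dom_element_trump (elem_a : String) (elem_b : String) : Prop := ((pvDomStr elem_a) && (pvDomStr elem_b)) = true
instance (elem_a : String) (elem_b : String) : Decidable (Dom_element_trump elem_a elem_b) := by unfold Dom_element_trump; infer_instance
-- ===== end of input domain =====

-- B replaces A's scan over three explicit beat-pairs with modular index arithmetic over the cycle ("W","F","E") — more idiomatic, same cost.


-- ===== PORT A =====
-- loop over beat_pairs with early return, as in A
def elementTrumpLoop (a : String) (b : String) : List (String × String) → Int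
  | [] => 0
  | pair :: rest =>
    if a = pair.1 ∧ b = pair.2 then 1
    else if a = pair.2 ∧ b = pair.1 then -1
    else elementTrumpLoop a b rest

def element_trump (elem_a : String) (elem_b : String) : Int :=
  elementTrumpLoop elem_a elem_b [("W", "F"), ("F", "E"), ("E", "W")]

-- ===== PORT B =====
-- B: modular index arithmetic over the cycle ("W","F","E")
def element_trump_alt (elem_a : String) (elem_b : String) : Int :=
  let cycle : List String := ["W", "F", "E"]
  if elem_a ∉ cycle ∨ elem_b ∉ cycle then 0
  else
    match PySem.List.index? cycle elem_b, PySem.List.index? cycle elem_a with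
    | some j, some i =>
      let diff := PySem.Int.mod ((j : Int) - (i : Int)) 3
      if diff = 1 then 1 else if diff = 2 then -1 else 0
    | _, _ => 0

-- ===== PRECONDITION & SPEC =====
def Spec_element_trump (elem_a : String) (elem_b : String) (out : Int) : Prop := out = element_trump_alt elem_a elem_b
instance (elem_a : String) (elem_b : String) (out : Int) : Decidable (Spec_element_trump elem_a elem_b out) := by unfold Spec_element_trump; infer_instance

-- ===== CLAIM (what is proved, stated in full; the proofs are below) =====
def Claim_equal_element_trump : Prop := ∀ (elem_a : String) (elem_b : String), Dom_element_trump elem_a elem_b → Spec_element_trump elem_a elem_b (element_trump elem_a elem_b)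

-- ===== LEMMAS AND PROOFS =====

-- ===== VERDICT (by name: the statement is the Claim_ definition above) =====
set_option maxRecDepth 4000 in
-- case-split each argument over the three recognized elements (or none); each case closes by evaluation
theorem element_trump_spec : Claim_equal_element_trump := by
  intro a b _
  unfold Spec_element_trump element_trump element_trump_alt
  rcases eq_or_ne a "W" with ha | ha <;> [skip; rcases eq_or_ne a "F" with ha2 | ha2] <;>
    [skip; skip; rcases eq_or_ne a "E" with ha3 | ha3] <;>
  (rcases eq_or_ne b "W" with hb | hb <;> [skip; rcases eq_or_ne b "F" with hb2 | hb2] <;>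
    [skip; skip; rcases eq_or_ne b "E" with hb3 | hb3]) <;>
  subst_vars <;>
  simp [elementTrumpLoop, PySem.List.index?, PySem.Int.mod, *] <;> decide
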